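-- pv_equiv track=rewrite | github.com/Rex-Chiang/IG-project | Crawler1.py | Statistic
-- ===== SOURCE A (Python) =====
-- def Statistic(like, comment):
--     # 原本的like、comment字典形式為[圖片網址:愛心數]、[圖片網址:留言數]
--     # 為了以愛心數、留言數做鍵查詢將字典形式改為[愛心數:圖片網址]、[留言數:圖片網址]
--     TransLike = {v : k for k, v in like.items()}
--     TransComm = {v : k for k, v in comment.items()}
--     # 取得最高愛心數、最高留言數、最低愛心數、最低留言數文章
--     Most_Liked_Posts = TransLike[max(like.values())]
--     Most_Commented_Posts = TransComm[max(comment.values())]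
--     Least_Liked_Posts = TransLike[min(like.values())]
--     Least_Commented_Posts = TransComm[min(comment.values())]
--
--     return Most_Liked_Posts, Most_Commented_Posts, Least_Liked_Posts, Least_Commented_Posts
-- ===== SOURCE B (Python) =====
-- def Statistic(like, comment):
--     # simpler: one pass per dict tracking (post, value) for max and min; no reverse dicts
--     def extremes(d):
--         hi = lo = None
--         for k, v in d.items():
--             if hi is None or v >= hi[1]:
--                 hi = (k, v)
--             if lo is None or v <= lo[1]:
--                 lo = (k, v)
--         return hi[0], lo[0]
--     most_l, least_l = extremes(like)
--     most_c, least_c = extremes(comment)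
--     return most_l, most_c, least_l, least_c
-- ===== Notes on version B (the rewrite author's own statement) =====
-- stated objective: simpler
-- what changed: Replaces the two value-keyed reverse dictionaries plus max()/min() lookups with a single pass over each dict tracking the running max and min entry (>=/<= so ties keep the last post, as dict overwriting did).
import Mathlib
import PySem

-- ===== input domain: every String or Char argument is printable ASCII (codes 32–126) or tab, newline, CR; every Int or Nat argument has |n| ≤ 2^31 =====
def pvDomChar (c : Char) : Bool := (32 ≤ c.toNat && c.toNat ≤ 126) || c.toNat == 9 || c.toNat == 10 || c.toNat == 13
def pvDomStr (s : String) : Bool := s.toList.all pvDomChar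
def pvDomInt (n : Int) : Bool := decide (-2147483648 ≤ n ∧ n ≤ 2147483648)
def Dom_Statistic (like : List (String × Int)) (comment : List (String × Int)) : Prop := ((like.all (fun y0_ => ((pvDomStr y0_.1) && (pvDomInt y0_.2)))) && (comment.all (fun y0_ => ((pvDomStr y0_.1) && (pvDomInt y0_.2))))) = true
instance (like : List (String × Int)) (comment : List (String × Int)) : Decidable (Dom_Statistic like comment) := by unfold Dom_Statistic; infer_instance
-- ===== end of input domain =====

-- B replaces A's value-keyed reverse dictionaries + max()/min() lookups by one max/min-tracking
-- pass per dict (objective: simpler); both raise on an empty dict, excluded by Pre_.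

-- ===== PORT A =====
def Statistic (like : List (String × Int)) (comment : List (String × Int)) : String × String × String × String :=
  -- TransLike = {v : k for k, v in like.items()}; TransComm likewise
  let transLike : PySem.Dict Int String := like.foldl (fun d p => d.insert p.2 p.1) PySem.Dict.empty
  let transComm : PySem.Dict Int String := comment.foldl (fun d p => d.insert p.2 p.1) PySem.Dict.empty
  -- max/min of like.values(), comment.values(); none (empty dict → ValueError) is outside Pre_
  let mostLiked := (transLike.get? ((PySem.List.max? (like.map Prod.snd) (fun y => y)).getD 0)).getD ""
  let mostCommented := (transComm.get? ((PySem.List.max? (comment.map Prod.snd) (fun y => y)).getD 0)).getD ""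
  let leastLiked := (transLike.get? ((PySem.List.min? (like.map Prod.snd) (fun y => y)).getD 0)).getD ""
  let leastCommented := (transComm.get? ((PySem.List.min? (comment.map Prod.snd) (fun y => y)).getD 0)).getD ""
  (mostLiked, mostCommented, leastLiked, leastCommented)

-- ===== PORT B =====
def pvHiStep (acc : Option (String × Int)) (p : String × Int) : Option (String × Int) :=
  match acc with
  | none => some p
  | some h => if p.2 ≥ h.2 then some p else some h

def pvLoStep (acc : Option (String × Int)) (p : String × Int) : Option (String × Int) :=
  match acc with
  | none => some p
  | some l => if p.2 ≤ l.2 then some p else some l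

-- one pass: running (post, value) for the max and for the min; None start (empty → outside Pre_)
def pvExtremes (d : List (String × Int)) : String × String :=
  let st := d.foldl (fun s p => (pvHiStep s.1 p, pvLoStep s.2 p)) (none, none)
  (((st.1).getD ("", 0)).1, ((st.2).getD ("", 0)).1)

def Statistic_alt (like : List (String × Int)) (comment : List (String × Int)) : String × String × String × String :=
  let el := pvExtremes like
  let ec := pvExtremes comment
  (el.1, ec.1, el.2, ec.2)

-- ===== PRECONDITION & SPEC =====
-- Pre_ excludes only empty dicts: there Python A raises ValueError (max of empty) and B raises TypeError.
def Pre_Statistic (like : List (String × Int)) (comment : List (String × Int)) : Prop :=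
  like ≠ [] ∧ comment ≠ []
instance (like : List (String × Int)) (comment : List (String × Int)) : Decidable (Pre_Statistic like comment) := by unfold Pre_Statistic; infer_instance

def pvWitness_Statistic : (List (String × Int)) × (List (String × Int)) :=
  ([("a", 3), ("b", 1)], [("c", 2)])

def Spec_Statistic (like : List (String × Int)) (comment : List (String × Int)) (out : String × String × String × String) : Prop := out = Statistic_alt like comment
instance (like : List (String × Int)) (comment : List (String × Int)) (out : String × String × String × String) : Decidable (Spec_Statistic like comment out) := by unfold Spec_Statistic; infer_instance

-- ===== CLAIM (what is proved, stated in full; the proofs are below) =====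
def Claim_equal_Statistic : Prop := ∀ (like : List (String × Int)) (comment : List (String × Int)), Dom_Statistic like comment → Pre_Statistic like comment → Spec_Statistic like comment (Statistic like comment)

-- ===== LEMMAS AND PROOFS =====

-- invariant of the max tracker vs. A's reverse-dict lookup of the running max
theorem pvHiMain (xs : List (String × Int)) : ∀ (d : PySem.Dict Int String) (h : String × Int),
    d.get? h.2 = some h.1 →
    ∃ p : String × Int, xs.foldl pvHiStep (some h) = some p ∧
      (xs.map Prod.snd).foldl max h.2 = p.2 ∧
      (xs.foldl (fun d q => d.insert q.2 q.1) d).get? p.2 = some p.1 := by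
  induction xs with
  | nil => intro d h hd; exact ⟨h, rfl, rfl, hd⟩
  | cons q t ih =>
    intro d h hd
    by_cases hcmp : q.2 ≥ h.2
    · have := ih (d.insert q.2 q.1) q (PySem.Dict.get?_insert_self d q.2 q.1)
      simpa [pvHiStep, hcmp, max_eq_right hcmp] using this
    · have hne : h.2 ≠ q.2 := by omega
      have hd' : (d.insert q.2 q.1).get? h.2 = some h.1 := by
        rw [PySem.Dict.get?_insert_of_ne d q.1 hne]; exact hd
      have := ih (d.insert q.2 q.1) h hd'
      simpa [pvHiStep, hcmp, max_eq_left (by omega : q.2 ≤ h.2)] using this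

-- invariant of the min tracker vs. A's reverse-dict lookup of the running min
theorem pvLoMain (xs : List (String × Int)) : ∀ (d : PySem.Dict Int String) (h : String × Int),
    d.get? h.2 = some h.1 →
    ∃ p : String × Int, xs.foldl pvLoStep (some h) = some p ∧
      (xs.map Prod.snd).foldl min h.2 = p.2 ∧
      (xs.foldl (fun d q => d.insert q.2 q.1) d).get? p.2 = some p.1 := by
  induction xs with
  | nil => intro d h hd; exact ⟨h, rfl, rfl, hd⟩
  | cons q t ih =>
    intro d h hd
    by_cases hcmp : q.2 ≤ h.2
    · have := ih (d.insert q.2 q.1) q (PySem.Dict.get?_insert_self d q.2 q.1)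
      simpa [pvLoStep, hcmp, min_eq_right hcmp] using this
    · have hne : h.2 ≠ q.2 := by omega
      have hd' : (d.insert q.2 q.1).get? h.2 = some h.1 := by
        rw [PySem.Dict.get?_insert_of_ne d q.1 hne]; exact hd
      have := ih (d.insert q.2 q.1) h hd'
      simpa [pvLoStep, hcmp, min_eq_left (by omega : h.2 ≤ q.2)] using this

-- both halves of one nonempty dict agree between A's formulas and B's pass
theorem pvSide (a : String × Int) (t : List (String × Int)) :
    ((((a :: t).foldl (fun d p => d.insert p.2 p.1) (PySem.Dict.empty : PySem.Dict Int String)).get?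
        ((PySem.List.max? ((a :: t).map Prod.snd) (fun y => y)).getD 0)).getD "",
     ((((a :: t).foldl (fun d p => d.insert p.2 p.1) (PySem.Dict.empty : PySem.Dict Int String)).get?
        ((PySem.List.min? ((a :: t).map Prod.snd) (fun y => y)).getD 0)).getD "")) =
    pvExtremes (a :: t) := by
  have hd0 : ((PySem.Dict.empty : PySem.Dict Int String).insert a.2 a.1).get? a.2 = some a.1 :=
    PySem.Dict.get?_insert_self _ a.2 a.1
  obtain ⟨ph, hfh, hmh, hgh⟩ := pvHiMain t (PySem.Dict.empty.insert a.2 a.1) a hd0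
  obtain ⟨pl, hfl, hml, hgl⟩ := pvLoMain t (PySem.Dict.empty.insert a.2 a.1) a hd0
  have hb : pvExtremes (a :: t) = (ph.1, pl.1) := by
    unfold pvExtremes
    rw [List.foldl_cons, PySem.List.foldl_prod_mk (f := pvHiStep) (g := pvLoStep)]
    simp [pvHiStep, pvLoStep, hfh, hfl]
  rw [hb]
  simp only [List.map_cons, PySem.List.max?_id_cons, PySem.List.min?_id_cons, List.foldl_cons,
    Option.getD_some]
  rw [hmh, hml, hgh, hgl]
  simp

-- ===== VERDICT (by name: the statement is the Claim_ definition above) =====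
theorem Statistic_spec : Claim_equal_Statistic := by
  intro like comment _ hpre
  obtain ⟨hl, hc⟩ := hpre
  obtain ⟨a, lt, rfl⟩ := List.exists_cons_of_ne_nil hl
  obtain ⟨b, ct, rfl⟩ := List.exists_cons_of_ne_nil hc
  have hL := pvSide a lt
  have hC := pvSide b ct
  unfold Spec_Statistic Statistic Statistic_alt
  rw [← hL, ← hC]
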